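-- pv_equiv track=rewrite | github.com/ai-research00/AegisPCAP | src/compliance/anonymization.py | measure_k_value
-- ===== SOURCE A (Python) =====
-- from typing import Dict, List, Optional, Tuple
--
-- def measure_k_value(dataset: List[Dict], quasi_identifiers: List[str]) -> int:
--     """
--     Measure k-value of dataset.
--
--     Args:
--         dataset: Dataset to measure
--         quasi_identifiers: QI fields
--
--     Returns:
--         k-value (minimum group size)
--     """
--     if not dataset:
--         return 0
--
--     groups: Dict[str, int] = {}
--     for record in dataset:
--         key_parts = [
--             str(record.get(field, "")) for field in quasi_identifiers
--         ]
--         key = "|".join(key_parts)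
--         groups[key] = groups.get(key, 0) + 1
--
--     k_value = min(groups.values()) if groups else 0
--     return k_value
-- ===== SOURCE B (Python) =====
-- from typing import Dict, List
--
--
-- def measure_k_value(dataset: List[Dict], quasi_identifiers: List[str]) -> int:
--     """k-value via sort-then-scan: sort the composite keys, then one linear pass
--     taking the minimum length of the maximal runs of equal adjacent keys."""
--     if not dataset:
--         return 0
--     keys = sorted(
--         "|".join(str(record.get(field, "")) for field in quasi_identifiers)
--         for record in dataset
--     )
--     k_value = len(keys)
--     prev = keys[0]
--     run = 1
--     for key in keys[1:]:
--         if key == prev: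
--             run += 1
--         else:
--             k_value = min(k_value, run)
--             run = 1
--         prev = key
--     return min(k_value, run)
-- ===== Notes on version B (the rewrite author's own statement) =====
-- stated objective: alternative
-- what changed: Replaces the hash-dict group counter with sort-then-scan grouping: build the composite keys, sort them, and take the minimum length of the maximal runs of equal adjacent keys in one linear pass.
import Mathlib
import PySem

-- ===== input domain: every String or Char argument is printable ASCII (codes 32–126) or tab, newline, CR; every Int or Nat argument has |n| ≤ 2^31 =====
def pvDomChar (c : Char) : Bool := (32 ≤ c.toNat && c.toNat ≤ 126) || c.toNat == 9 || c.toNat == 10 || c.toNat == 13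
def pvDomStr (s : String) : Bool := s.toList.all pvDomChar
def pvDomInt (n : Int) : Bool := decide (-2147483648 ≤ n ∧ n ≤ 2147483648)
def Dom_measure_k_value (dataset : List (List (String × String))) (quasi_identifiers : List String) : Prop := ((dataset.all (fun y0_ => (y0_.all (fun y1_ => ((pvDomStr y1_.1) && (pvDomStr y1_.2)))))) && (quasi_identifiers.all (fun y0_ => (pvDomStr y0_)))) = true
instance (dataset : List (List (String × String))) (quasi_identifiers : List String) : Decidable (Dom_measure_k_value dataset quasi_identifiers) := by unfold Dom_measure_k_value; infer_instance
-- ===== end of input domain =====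

-- B replaces A's hash-dict group counter with sort-then-scan grouping (alternative decomposition, not claimed faster).

-- ===== PORT A =====
def measure_k_value (dataset : List (List (String × String))) (quasi_identifiers : List String) : Int :=
  if dataset = [] then 0
  else
    let groups : PySem.Dict String Int :=
      dataset.foldl (fun g record =>
        let key_parts := quasi_identifiers.map (fun field => PySem.Dict.getD (PySem.Dict.mk record) field "")
        let key := PySem.Str.join "|" key_parts
        g.insert key (g.getD key 0 + 1)) PySem.Dict.empty
    match PySem.List.min? groups.values (fun v => v) with
    | some v => v
    | none => 0

-- ===== PORT B =====
def measure_k_value_alt (dataset : List (List (String × String))) (quasi_identifiers : List String) : Int :=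
  if dataset = [] then 0
  else
    let keys := PySem.List.sorted (dataset.map (fun record =>
      PySem.Str.join "|" (quasi_identifiers.map (fun field => PySem.Dict.getD (PySem.Dict.mk record) field "")))) (fun x => x) false
    match keys with
    | [] => 0   -- unreachable: dataset ≠ [] so keys ≠ []
    | h :: t =>
      -- k_value = len(keys); prev = keys[0]; run = 1; for key in keys[1:]: …
      let st := t.foldl (fun (st : String × Int × Int) key =>
          if key = st.1 then (key, st.2.1 + 1, st.2.2)
          else (key, 1, min st.2.2 st.2.1)) (h, 1, ((t.length : Int) + 1))
      min st.2.2 st.2.1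

-- ===== PRECONDITION & SPEC =====
def Spec_measure_k_value (dataset : List (List (String × String))) (quasi_identifiers : List String) (out : Int) : Prop := out = measure_k_value_alt dataset quasi_identifiers
instance (dataset : List (List (String × String))) (quasi_identifiers : List String) (out : Int) : Decidable (Spec_measure_k_value dataset quasi_identifiers out) := by unfold Spec_measure_k_value; infer_instance

-- ===== CLAIM (what is proved, stated in full; the proofs are below) =====
def Claim_equal_measure_k_value : Prop := ∀ (dataset : List (List (String × String))) (quasi_identifiers : List String), Dom_measure_k_value dataset quasi_identifiers → Spec_measure_k_value dataset quasi_identifiers (measure_k_value dataset quasi_identifiers)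

-- ===== LEMMAS AND PROOFS =====

-- minimum of the run lengths of maximal runs of equal adjacent keys, the current run having
-- head `prev` and length `run` so far
def runsMin (prev : String) (run : Int) : List String → Int
  | [] => run
  | x :: xs => if x = prev then runsMin x (run + 1) xs else min run (runsMin x 1 xs)

-- B's fold computes min kmin (runsMin prev run xs)
lemma foldB_eq_runsMin (xs : List String) : ∀ (prev : String) (run kmin : Int),
    (let st := xs.foldl (fun (st : String × Int × Int) key =>
        if key = st.1 then (key, st.2.1 + 1, st.2.2)
        else (key, 1, min st.2.2 st.2.1)) (prev, run, kmin)
     min st.2.2 st.2.1) = min kmin (runsMin prev run xs) := by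
  induction xs with
  | nil => intro prev run kmin; simp [runsMin]
  | cons x xs ih =>
    intro prev run kmin
    by_cases h : x = prev
    · simpa [List.foldl_cons, h, runsMin] using ih x (run + 1) kmin
    · simpa [List.foldl_cons, h, runsMin, min_assoc] using ih x 1 (min kmin run)


lemma runsMin_cons_self (prev : String) (run : Int) (xs : List String) :
    runsMin prev run (prev :: xs) = runsMin prev (run + 1) xs := by
  rw [runsMin]; simp

lemma runsMin_cons_ne {x prev : String} (run : Int) (xs : List String) (h : x ≠ prev) :
    runsMin prev run (x :: xs) = min run (runsMin x 1 xs) := by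
  rw [runsMin]; simp [h]

-- on a sorted tail whose elements all dominate prev, runsMin is a count of some key and a
-- lower bound on all counts (the count of prev offset by the part of its run already seen)
lemma runsMin_spec (l : List String) : l.Pairwise (· ≤ ·) → ∀ (prev : String) (run : Int),
    (∀ y ∈ l, prev ≤ y) →
    ((runsMin prev run l = run + (l.count prev : Int) ∨
        ∃ k ∈ l, k ≠ prev ∧ runsMin prev run l = (l.count k : Int))
      ∧ runsMin prev run l ≤ run + (l.count prev : Int)
      ∧ ∀ k ∈ l, k ≠ prev → runsMin prev run l ≤ (l.count k : Int)) := by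
  induction l with
  | nil => intro _ prev run _; simp [runsMin]
  | cons x xs ih =>
    intro hp prev run hlo
    have hxle : ∀ y ∈ xs, x ≤ y := fun y hy => (List.pairwise_cons.1 hp).1 y hy
    have hxs : xs.Pairwise (· ≤ ·) := (List.pairwise_cons.1 hp).2
    by_cases h : x = prev
    · subst h
      obtain ⟨hmem, hub, hlb⟩ := ih hxs x (run + 1) hxle
      refine ⟨?_, ?_, ?_⟩
      · rcases hmem with h1 | ⟨k, hk, hkne, hkeq⟩
        · left; rw [runsMin_cons_self]; rw [h1, List.count_cons_self]; push_cast; ring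
        · right; refine ⟨k, List.mem_cons_of_mem _ hk, hkne, ?_⟩
          rw [runsMin_cons_self]; rw [hkeq, List.count_cons_of_ne (Ne.symm hkne)]
      · rw [runsMin_cons_self]
        rw [List.count_cons_self]; push_cast
        calc runsMin x (run + 1) xs ≤ run + 1 + (xs.count x : Int) := hub
        _ = run + ((xs.count x : Int) + 1) := by ring
      · intro k hk hkne
        rw [runsMin_cons_self]
        have hk' : k ∈ xs := by
          rcases List.mem_cons.1 hk with h | h
          · exact absurd h hkne
          · exact h
        rw [List.count_cons_of_ne (Ne.symm hkne)]
        exact hlb k hk' hkne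
    · -- x ≠ prev; since prev ≤ x and xs ≥ x, prev does not occur in x :: xs
      have hpx : prev < x := lt_of_le_of_ne (hlo x (List.mem_cons_self)) (fun e => h e.symm)
      have hnot : prev ∉ x :: xs := by
        intro hmem
        rcases List.mem_cons.1 hmem with h1 | h1
        · exact absurd h1.symm (ne_of_gt hpx)
        · exact absurd (hxle prev h1) (not_le_of_gt hpx)
      have hcnt0 : (x :: xs).count prev = 0 := List.count_eq_zero.2 hnot
      obtain ⟨hmem, hub, hlb⟩ := ih hxs x 1 hxle
      have hdef : runsMin prev run (x :: xs) = min run (runsMin x 1 xs) := by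
        rw [runsMin_cons_ne run xs h]
      refine ⟨?_, ?_, ?_⟩
      · rcases le_total run (runsMin x 1 xs) with hle | hle
        · left; rw [hdef, min_eq_left hle, hcnt0]; simp
        · right
          rcases hmem with h1 | ⟨k, hk, hkne, hkeq⟩
          · refine ⟨x, List.mem_cons_self, fun e => h e, ?_⟩
            rw [hdef, min_eq_right hle, h1, List.count_cons_self]; push_cast; ring
          · have hkprev : k ≠ prev := fun e => hnot (e ▸ List.mem_cons_of_mem _ hk)
            refine ⟨k, List.mem_cons_of_mem _ hk, hkprev, ?_⟩
            rw [hdef, min_eq_right hle, hkeq, List.count_cons_of_ne (Ne.symm hkne)]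
      · rw [hdef, hcnt0]; push_cast
        simp only [add_zero]
        exact min_le_left run _
      · intro k hk _
        rw [hdef]
        by_cases hkx : k = x
        · subst hkx
          rw [List.count_cons_self]; push_cast
          calc min run (runsMin k 1 xs) ≤ runsMin k 1 xs := min_le_right _ _
          _ ≤ 1 + (xs.count k : Int) := hub
          _ = (xs.count k : Int) + 1 := by ring
        · have hk' : k ∈ xs := by
            rcases List.mem_cons.1 hk with h1 | h1
            · exact absurd h1 hkx
            · exact h1
          rw [List.count_cons_of_ne (Ne.symm hkx)]
          exact le_trans (min_le_right _ _) (hlb k hk' hkx)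

-- ===== VERDICT (by name: the statement is the Claim_ definition above) =====
theorem measure_k_value_spec : Claim_equal_measure_k_value := by
  intro dataset quasi_identifiers _
  unfold Spec_measure_k_value measure_k_value measure_k_value_alt
  by_cases hds : dataset = []
  · simp [hds]
  · simp only [if_neg hds]
    set keyf := fun record : List (String × String) =>
      PySem.Str.join "|" (quasi_identifiers.map (fun field => PySem.Dict.getD (PySem.Dict.mk record) field "")) with hkeyf
    set keys := dataset.map keyf with hkeys
    have hkne : keys ≠ [] := by simpa [hkeys] using hds
    -- A's dict is Counter(keys); its values are the counts of the distinct keys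
    have hA : dataset.foldl (fun (g : PySem.Dict String Int) record =>
        let key_parts := quasi_identifiers.map (fun field => PySem.Dict.getD (PySem.Dict.mk record) field "")
        let key := PySem.Str.join "|" key_parts
        g.insert key (g.getD key 0 + 1)) PySem.Dict.empty = PySem.Dict.counter keys := by
      rw [hkeys, ← PySem.Dict.foldl_insert_getD_add_one_eq_counter, List.foldl_map]
    rw [hA]
    have hv : (PySem.Dict.counter keys).values
        = (PySem.List.dedup keys).map (fun k => (keys.count k : Int)) := by
      simp [PySem.Dict.values, PySem.Dict.items_counter, List.map_map, Function.comp]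
    rw [hv]
    -- the sorted keys
    set s := PySem.List.sorted keys (fun x => x) false with hs
    have hsperm : s.Perm keys := PySem.List.sorted_perm keys _ false
    have hsne : s ≠ [] := by
      intro hnil
      rw [hnil] at hsperm
      exact hkne hsperm.symm.eq_nil
    obtain ⟨h, t, hst⟩ : ∃ h t, s = h :: t := by
      match s, hsne with
      | h :: t, _ => exact ⟨h, t, rfl⟩
    -- order facts about the sorted list
    have hsp : s.Pairwise (· ≤ ·) := by
      simpa [hs] using PySem.List.sorted_pairwise keys (fun x : String => x) 
    rw [hst] at hsp
    have hlo : ∀ y ∈ t, h ≤ y := (List.pairwise_cons.1 hsp).1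
    have htp : t.Pairwise (· ≤ ·) := (List.pairwise_cons.1 hsp).2
    obtain ⟨hmem, hub, hlb⟩ := runsMin_spec t htp h 1 hlo
    set R := runsMin h 1 t with hR
    have hcount : ∀ k, s.count k = keys.count k := fun k => hsperm.count_eq k
    -- R is the count of some key of keys
    obtain ⟨kB, hkB, hRkB⟩ : ∃ kB ∈ keys, R = (keys.count kB : Int) := by
      rcases hmem with h1 | ⟨k, hk, hkne, hkeq⟩
      · refine ⟨h, hsperm.mem_iff.1 (hst ▸ List.mem_cons_self), ?_⟩
        rw [← hcount h, hst, List.count_cons_self, h1]; push_cast; ring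
      · refine ⟨k, hsperm.mem_iff.1 (hst ▸ List.mem_cons_of_mem _ hk), ?_⟩
        rw [← hcount k, hst, List.count_cons_of_ne (Ne.symm hkne), hkeq]
    -- R is a lower bound on all key counts
    have hRlb : ∀ k ∈ keys, R ≤ (keys.count k : Int) := by
      intro k hk
      have hks : k ∈ h :: t := hst ▸ hsperm.mem_iff.2 hk
      have hcnt : keys.count k = (h :: t).count k := by rw [← hcount k, hst]
      by_cases hkh : k = h
      · subst hkh
        rw [hcnt, List.count_cons_self]; push_cast
        calc R ≤ 1 + (t.count k : Int) := hub
        _ = (t.count k : Int) + 1 := by ring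
      · have hkt : k ∈ t := by
          rcases List.mem_cons.1 hks with h1 | h1
          · exact absurd h1 hkh
          · exact h1
        rw [hcnt, List.count_cons_of_ne (Ne.symm hkh)]
        exact hlb k hkt hkh
    -- B's fold is exactly R
    have hBfold := foldB_eq_runsMin t h 1 ((t.length : Int) + 1)
    have hRle : R ≤ (t.length : Int) + 1 := by
      have h1 : keys.count kB ≤ keys.length := List.count_le_length
      have h2 : keys.length = t.length + 1 := by
        rw [← hsperm.length_eq, hst, List.length_cons]
      rw [hRkB]
      have := h2 ▸ h1
      exact_mod_cast this
    -- the A side: min? over the counts of the distinct keys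
    have hLne : (PySem.List.dedup keys).map (fun k => (keys.count k : Int)) ≠ [] := by
      obtain ⟨k0, hk0⟩ := List.exists_mem_of_ne_nil keys hkne
      have : k0 ∈ PySem.List.dedup keys := (PySem.List.mem_dedup _ _).2 hk0
      intro hnil
      rw [List.map_eq_nil_iff] at hnil
      rw [hnil] at this
      exact absurd this (List.not_mem_nil)
    cases hmin : PySem.List.min? ((PySem.List.dedup keys).map (fun k => (keys.count k : Int))) (fun v => v) with
    | none => exact absurd ((PySem.List.min?_eq_none_iff _ _).1 hmin) hLne
    | some m =>
      have hmmem := PySem.List.min?_mem hmin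
      have hmlb := PySem.List.min?_isMin hmin
      obtain ⟨kA, hkA, hmkA⟩ := List.mem_map.1 hmmem
      have hkA' : kA ∈ keys := (PySem.List.mem_dedup _ _).1 hkA
      have hmR : m = R := by
        apply le_antisymm
        · have : (keys.count kB : Int) ∈ (PySem.List.dedup keys).map (fun k => (keys.count k : Int)) :=
            List.mem_map.2 ⟨kB, (PySem.List.mem_dedup _ _).2 hkB, rfl⟩
          rw [hRkB]
          exact hmlb _ this
        · rw [← hmkA]
          exact hRlb kA hkA'
      rw [hst]
      simp only []
      rw [hBfold, ← hR, min_eq_right hRle]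
      exact hmR
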